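-- pv_equiv track=rewrite | github.com/MM-Speech/VoxMind | scripts/think_dataset_s2s.py | _interleave_token_ids
-- ===== SOURCE A (Python) =====
-- from typing import Dict, List, Optional, Sequence, Tuple
--
-- AUDIO_GROUP_SIZE = 4
--
-- def _interleave_token_ids(
--     text_token_ids: Sequence[int],
--     audio_token_ids: Sequence[int],
--     pad_token_id: Optional[int],
-- ) -> List[int]:
--     if not text_token_ids:
--         return list(audio_token_ids)
--     if not audio_token_ids:
--         return list(text_token_ids)
--
--     interleaved: List[int] = []
--     audio_index = 0
--     total_audio = len(audio_token_ids)
--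
--     for text_id in text_token_ids:
--         interleaved.append(text_id)
--         next_audio_index = min(total_audio, audio_index + AUDIO_GROUP_SIZE)
--         if next_audio_index > audio_index:
--             interleaved.extend(audio_token_ids[audio_index:next_audio_index])
--             audio_index = next_audio_index
--
--     while audio_index < total_audio:
--         if pad_token_id is not None:
--             interleaved.append(pad_token_id)
--         next_audio_index = min(total_audio, audio_index + AUDIO_GROUP_SIZE)
--         interleaved.extend(audio_token_ids[audio_index:next_audio_index])
--         audio_index = next_audio_index
--     return interleaved
-- ===== SOURCE B (Python) =====
-- from typing import List, Optional, Sequence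
--
-- AUDIO_GROUP_SIZE = 4
--
-- def _interleave_token_ids(
--     text_token_ids: Sequence[int],
--     audio_token_ids: Sequence[int],
--     pad_token_id: Optional[int],
-- ) -> List[int]:
--     if not text_token_ids:
--         return list(audio_token_ids)
--     out: List[int] = []
--     for k, text_id in enumerate(text_token_ids):
--         out.append(text_id)
--         out.extend(audio_token_ids[AUDIO_GROUP_SIZE * k : AUDIO_GROUP_SIZE * k + AUDIO_GROUP_SIZE])
--     tail = list(audio_token_ids[AUDIO_GROUP_SIZE * len(text_token_ids):])
--     while tail:
--         if pad_token_id is not None: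
--             out.append(pad_token_id)
--         out.extend(tail[:AUDIO_GROUP_SIZE])
--         tail = tail[AUDIO_GROUP_SIZE:]
--     return out
-- ===== Notes on version B (the rewrite author's own statement) =====
-- stated objective: alternative
-- what changed: B replaces A's mutable audio cursor (audio_index advanced with min inside the text loop, then a while loop over the same cursor) with closed-form slice arithmetic: enumerate(text) picks audio[4k:4k+4] directly, and the leftover groups are consumed by slicing a shrinking tail list, so no index state or min() survives.
import Mathlib
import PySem

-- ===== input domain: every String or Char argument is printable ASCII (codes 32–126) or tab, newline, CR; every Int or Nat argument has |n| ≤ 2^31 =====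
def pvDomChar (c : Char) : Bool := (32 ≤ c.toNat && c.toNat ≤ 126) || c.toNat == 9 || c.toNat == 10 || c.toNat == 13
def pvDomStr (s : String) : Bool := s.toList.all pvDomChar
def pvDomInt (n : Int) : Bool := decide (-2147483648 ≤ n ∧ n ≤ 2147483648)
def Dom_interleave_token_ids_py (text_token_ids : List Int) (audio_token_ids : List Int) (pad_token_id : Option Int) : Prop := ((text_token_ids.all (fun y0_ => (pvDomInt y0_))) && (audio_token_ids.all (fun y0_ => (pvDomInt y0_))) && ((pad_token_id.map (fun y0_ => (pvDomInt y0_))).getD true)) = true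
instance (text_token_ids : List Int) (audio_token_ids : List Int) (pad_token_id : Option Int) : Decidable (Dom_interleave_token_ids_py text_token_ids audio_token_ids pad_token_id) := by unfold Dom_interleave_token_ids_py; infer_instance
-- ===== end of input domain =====

-- B replaces A's mutable audio cursor with closed-form slice indices (enumerate) and a
-- shrinking-tail while loop; objective: simpler/alternative decomposition, same cost.

-- ===== PORT A =====
-- the trailing while loop of A: state = (interleaved, audio_index); terminates because
-- audio_index strictly increases towards total_audio
def interleaveAWhile (a : List Int) (pad : Option Int) (interleaved : List Int) (ai : Int) : List Int :=
  if _h : ai < (a.length : Int) then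
    -- 'pre'/'next_audio_index' of the Python body are inlined here
    interleaveAWhile a pad
      ((match pad with
        | some p => interleaved ++ [p]
        | none => interleaved) ++
        PySem.List.slice a (some ai) (some (min (a.length : Int) (ai + 4))))
      (min (a.length : Int) (ai + 4))
  else interleaved
termination_by ((a.length : Int) - ai).toNat
decreasing_by
  omega

def interleave_token_ids_py (text_token_ids : List Int) (audio_token_ids : List Int) (pad_token_id : Option Int) : List Int :=
  if text_token_ids = [] then audio_token_ids
  else if audio_token_ids = [] then text_token_ids
  else
    let total : Int := (audio_token_ids.length : Int)
    let st := text_token_ids.foldl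
      (fun (st : List Int × Int) text_id =>
        let interleaved := st.1 ++ [text_id]
        let nai := min total (st.2 + 4)
        if st.2 < nai then
          (interleaved ++ PySem.List.slice audio_token_ids (some st.2) (some nai), nai)
        else (interleaved, st.2))
      ([], 0)
    interleaveAWhile audio_token_ids pad_token_id st.1 st.2

-- ===== PORT B =====
-- the while loop of B: the tail itself shrinks by AUDIO_GROUP_SIZE each turn
def interleaveBWhile (pad : Option Int) (out : List Int) (tail : List Int) : List Int :=
  if h : tail = [] then out
  else
    -- the conditional pad-append of the Python body is inlined here
    interleaveBWhile pad
      ((match pad with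
        | some p => out ++ [p]
        | none => out) ++ PySem.List.slice tail none (some 4))
      (PySem.List.slice tail (some 4) none)
termination_by tail.length
decreasing_by
  rw [PySem.List.slice_from tail (by omega : (0:Int) ≤ 4)]
  cases tail with
  | nil => exact absurd rfl h
  | cons x xs => simp

def interleave_token_ids_py_alt (text_token_ids : List Int) (audio_token_ids : List Int) (pad_token_id : Option Int) : List Int :=
  if text_token_ids = [] then audio_token_ids
  else
    let out := (PySem.List.enumerate text_token_ids).foldl
      (fun out kx =>
        out ++ [kx.2] ++ PySem.List.slice audio_token_ids (some (4 * kx.1)) (some (4 * kx.1 + 4)))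
      []
    let tail := PySem.List.slice audio_token_ids (some (4 * (text_token_ids.length : Int))) none
    interleaveBWhile pad_token_id out tail

-- ===== PRECONDITION & SPEC =====
def Spec_interleave_token_ids_py (text_token_ids : List Int) (audio_token_ids : List Int) (pad_token_id : Option Int) (out : List Int) : Prop := out = interleave_token_ids_py_alt text_token_ids audio_token_ids pad_token_id
instance (text_token_ids : List Int) (audio_token_ids : List Int) (pad_token_id : Option Int) (out : List Int) : Decidable (Spec_interleave_token_ids_py text_token_ids audio_token_ids pad_token_id out) := by unfold Spec_interleave_token_ids_py; infer_instance

-- ===== CLAIM (what is proved, stated in full; the proofs are below) =====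
def Claim_equal_interleave_token_ids_py : Prop := ∀ (text_token_ids : List Int) (audio_token_ids : List Int) (pad_token_id : Option Int), Dom_interleave_token_ids_py text_token_ids audio_token_ids pad_token_id → Spec_interleave_token_ids_py text_token_ids audio_token_ids pad_token_id (interleave_token_ids_py text_token_ids audio_token_ids pad_token_id)

-- ===== LEMMAS AND PROOFS =====

-- common reference shape: text interleaved with 4-groups of audio
def interT : List Int → List Int → List Int
  | [], _ => []
  | x :: ts, a => x :: (a.take 4 ++ interT ts (a.drop 4))

-- common reference shape of the trailing loop: remaining 4-groups, each preceded by the pad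
def padT (pad : Option Int) : List Int → List Int
  | [] => []
  | x :: rest =>
    (match pad with | some p => [p] | none => []) ++
      ((x :: rest).take 4 ++ padT pad ((x :: rest).drop 4))
termination_by l => l.length
decreasing_by
  simp

theorem interT_nil_right : ∀ (t : List Int), interT t [] = t := by
  intro t; induction t with
  | nil => rfl
  | cons x ts ih => simp [interT, ih]

theorem drop_min_eq (a : List Int) (m : Nat) : a.drop (min a.length m) = a.drop m := by
  rcases le_total m a.length with h | h
  · rw [min_eq_right h]
  · rw [min_eq_left h]
    rw [List.drop_eq_nil_of_le le_rfl, List.drop_eq_nil_of_le h]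

theorem take_min_eq (a : List Int) (i : Nat) :
    (a.drop i).take (min a.length (i + 4) - i) = (a.drop i).take 4 := by
  rcases le_total (i + 4) a.length with h | h
  · rw [min_eq_right h]; congr 1; omega
  · rw [min_eq_left h]
    rcases le_total a.length i with h2 | h2
    · rw [List.drop_eq_nil_of_le h2]; simp
    · rw [List.take_of_length_le (by simp only [List.length_drop]; omega),
        List.take_of_length_le (by simp only [List.length_drop]; omega)]

theorem foldA_eq (a : List Int) :
    ∀ (t : List Int) (i : Nat) (acc : List Int), i ≤ a.length →
      t.foldl
        (fun (st : List Int × Int) text_id =>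
          let interleaved := st.1 ++ [text_id]
          let nai := min (a.length : Int) (st.2 + 4)
          if st.2 < nai then
            (interleaved ++ PySem.List.slice a (some st.2) (some nai), nai)
          else (interleaved, st.2))
        (acc, (i : Int))
      = (acc ++ interT t (a.drop i), ((min a.length (i + 4 * t.length) : Nat) : Int)) := by
  intro t
  induction t with
  | nil =>
    intro i acc hi
    simp [interT]
    omega
  | cons x ts ih =>
    intro i acc hi
    simp only [List.foldl_cons]
    by_cases hlt : i < a.length
    · have hmin : min (a.length : Int) ((i : Int) + 4) = ((min a.length (i + 4) : Nat) : Int) := by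
        push_cast; omega
      have hcond : (i : Int) < min (a.length : Int) ((i : Int) + 4) := by omega
      rw [if_pos hcond]
      have hslice : PySem.List.slice a (some (i : Int)) (some (min (a.length : Int) ((i : Int) + 4)))
          = (a.drop i).take 4 := by
        rw [hmin, PySem.List.slice_natCast, take_min_eq]
      rw [hslice, hmin]
      rw [ih (min a.length (i + 4)) _ (by omega)]
      simp only [Prod.mk.injEq]
      constructor
      · simp [interT]
        rw [drop_min_eq]
      · simp only [List.length_cons]
        congr 1
        omega
    · have hi' : i = a.length := by omega
      have hcond : ¬ ((i : Int) < min (a.length : Int) ((i : Int) + 4)) := by omega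
      rw [if_neg hcond]
      rw [ih i _ hi]
      simp only [Prod.mk.injEq]
      constructor
      · subst hi'
        simp [List.drop_length, interT, interT_nil_right]
      · simp only [List.length_cons]
        congr 1
        omega

theorem whileA_eq (a : List Int) (pad : Option Int) :
    ∀ (n : Nat) (i : Nat) (acc : List Int), i ≤ a.length → a.length - i ≤ n →
      interleaveAWhile a pad acc (i : Int) = acc ++ padT pad (a.drop i) := by
  intro n
  induction n with
  | zero =>
    intro i acc hi hn
    have : i = a.length := by omega
    subst this
    rw [interleaveAWhile.eq_def]
    simp [padT, List.drop_length]
  | succ n ih =>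
    intro i acc hi hn
    rw [interleaveAWhile.eq_def]
    by_cases hlt : (i : Int) < (a.length : Int)
    · rw [dif_pos hlt]
      have hmin : min (a.length : Int) ((i : Int) + 4) = ((min a.length (i + 4) : Nat) : Int) := by
        push_cast; omega
      have hslice : PySem.List.slice a (some (i : Int)) (some (min (a.length : Int) ((i : Int) + 4)))
          = (a.drop i).take 4 := by
        rw [hmin, PySem.List.slice_natCast, take_min_eq]
      rw [hslice, hmin]
      rw [ih (min a.length (i + 4)) _ (by omega) (by omega)]
      have hne : a.drop i ≠ [] := by
        intro hcon
        have := List.drop_eq_nil_iff.mp hcon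
        omega
      obtain ⟨y, ys, hys⟩ := List.exists_cons_of_ne_nil hne
      rw [hys]
      cases pad with
      | none =>
        simp only [padT]
        rw [← hys, List.drop_drop, drop_min_eq]
        simp
      | some p =>
        simp only [padT]
        rw [← hys, List.drop_drop, drop_min_eq]
        simp
    · rw [dif_neg hlt]
      have : i = a.length := by omega
      subst this
      simp [padT, List.drop_length]

theorem foldB_eq (a : List Int) :
    ∀ (t : List Int) (j : Nat) (acc : List Int),
      (PySem.List.enumerate t (j : Int)).foldl
        (fun out (kx : Int × Int) =>
          out ++ [kx.2] ++ PySem.List.slice a (some (4 * kx.1)) (some (4 * kx.1 + 4)))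
        acc
      = acc ++ interT t (a.drop (4 * j)) := by
  intro t
  induction t with
  | nil => intro j acc; simp [PySem.List.enumerate_nil, interT]
  | cons x ts ih =>
    intro j acc
    rw [PySem.List.enumerate_cons, List.foldl_cons]
    have hslice : PySem.List.slice a (some (4 * (j : Int))) (some (4 * (j : Int) + 4))
        = (a.drop (4 * j)).take 4 := by
      have h1 : (4 * (j : Int)) = ((4 * j : Nat) : Int) := by push_cast; ring
      have h2 : (4 * (j : Int) + 4) = ((4 * j : Nat) : Int) + ((4 : Nat) : Int) := by
        push_cast; ring
      rw [h2, h1, PySem.List.slice_natCast_add]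
    have hj1 : ((j : Int) + 1) = ((j + 1 : Nat) : Int) := by push_cast; ring
    rw [hslice, hj1, ih (j + 1)]
    simp [interT]
    have h3 : 4 * (j + 1) = 4 * j + 4 := by omega
    rw [h3]

theorem whileB_eq (pad : Option Int) :
    ∀ (n : Nat) (tail : List Int) (out : List Int), tail.length ≤ n →
      interleaveBWhile pad out tail = out ++ padT pad tail := by
  intro n
  induction n with
  | zero =>
    intro tail out h
    have : tail = [] := List.eq_nil_of_length_eq_zero (by omega)
    subst this
    rw [interleaveBWhile.eq_def]
    simp [padT]
  | succ n ih =>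
    intro tail out h
    rw [interleaveBWhile.eq_def]
    by_cases hnil : tail = []
    · subst hnil; simp [padT]
    · rw [dif_neg hnil]
      have hto : PySem.List.slice tail none (some 4) = tail.take 4 := by
        rw [PySem.List.slice_to tail (by omega : (0:Int) ≤ 4)]
        congr 1
      have hfrom : PySem.List.slice tail (some 4) none = tail.drop 4 := by
        rw [PySem.List.slice_from tail (by omega : (0:Int) ≤ 4)]
        congr 1
      rw [hto, hfrom]
      rw [ih (tail.drop 4) _ (by simp; omega)]
      obtain ⟨y, ys, hys⟩ := List.exists_cons_of_ne_nil hnil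
      rw [hys]
      cases pad with
      | none => simp only [padT]; rw [← hys]; simp
      | some p => simp only [padT]; rw [← hys]; simp

theorem alt_closed (t a : List Int) (pad : Option Int) (ht : t ≠ []) :
    interleave_token_ids_py_alt t a pad = interT t a ++ padT pad (a.drop (4 * t.length)) := by
  unfold interleave_token_ids_py_alt
  rw [if_neg ht]
  simp only []
  have hfrom : PySem.List.slice a (some (4 * (t.length : Int))) none = a.drop (4 * t.length) := by
    have h1 : (4 * (t.length : Int)) = ((4 * t.length : Nat) : Int) := by push_cast; ring
    rw [h1, PySem.List.slice_from a (by positivity)]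
    simp
    omega
  rw [hfrom]
  rw [whileB_eq pad (a.drop (4 * t.length)).length _ _ le_rfl]
  have h0 : (0 : Int) = ((0 : Nat) : Int) := rfl
  rw [h0, foldB_eq a t 0 []]
  simp

-- ===== VERDICT (by name: the statement is the Claim_ definition above) =====
theorem interleave_token_ids_py_spec : Claim_equal_interleave_token_ids_py := by
  intro t a pad _
  unfold Spec_interleave_token_ids_py
  unfold interleave_token_ids_py
  by_cases ht : t = []
  · subst ht
    simp [interleave_token_ids_py_alt]
  · rw [if_neg ht]
    by_cases ha : a = []
    · subst ha
      rw [if_pos rfl, alt_closed t [] pad ht]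
      simp [interT_nil_right, padT]
    · rw [if_neg ha]
      simp only []
      have h0 : (0 : Int) = ((0 : Nat) : Int) := rfl
      rw [h0, foldA_eq a t 0 [] (by omega)]
      simp only [List.nil_append]
      rw [whileA_eq a pad a.length (min a.length (0 + 4 * t.length)) _ (by omega) (by omega)]
      rw [drop_min_eq, alt_closed t a pad ht]
      simp
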